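-- pv_equiv track=rewrite | github.com/yichiche/torch-profiler-parser | visualize_module_tree.py | _detect_repeating_pattern
-- ===== SOURCE A (Python) =====
-- from typing import Any, Dict, List, Optional, Tuple
--
-- def _detect_repeating_pattern(type_seq: List[str]):
--     """Find the best repeating pattern that covers the most elements.
--
--     Tries starting from each possible offset to handle header elements
--     (e.g., VocabParallelEmbedding before the decoder layers).
--
--     Returns (pattern, repeats, start_idx, end_idx) or None.
--     """
--     n = len(type_seq)
--     best = None  # (coverage, pattern, repeats, start_idx, end_idx)
--     # Try different start offsets (header items before the pattern)
--     for start in range(min(n // 2, 5)):  # max 5 header items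
--         sub = type_seq[start:]
--         sub_n = len(sub)
--         for plen in range(1, sub_n // 2 + 1):
--             pattern = sub[:plen]
--             repeats = 0
--             for i in range(0, sub_n, plen):
--                 if sub[i:i + plen] == pattern:
--                     repeats += 1
--                 else:
--                     break
--             if repeats >= 2:
--                 coverage = repeats * plen
--                 if best is None or coverage > best[0]:
--                     best = (coverage, pattern, repeats, start, start + coverage)
--     if best:
--         return best[1], best[2], best[3], best[4]
--     return None
-- ===== SOURCE B (Python) =====
-- from typing import List
--
-- def _z_array(sub: List[str]) -> List[int]:
--     """Z-function: z[i] = length of the longest common prefix of sub and sub[i:]."""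
--     m = len(sub)
--     z = [0] * m
--     l = r = 0
--     for i in range(1, m):
--         k = 0
--         if i < r:
--             k = min(r - i, z[i - l])
--         while i + k < m and sub[k] == sub[i + k]:
--             k += 1
--         z[i] = k
--         if i + k > r:
--             l, r = i, i + k
--     return z
--
-- def _detect_repeating_pattern(type_seq: List[str]):
--     """For each start offset compute the Z-array once; the number of leading
--     repeats of the length-plen block is then z[plen] // plen + 1 directly.
--     Collect (coverage, plen, repeats, start) candidates and materialize only
--     the first candidate of maximal coverage."""
--     n = len(type_seq)
--     cands = []
--     for start in range(min(n // 2, 5)):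
--         m = n - start
--         z = _z_array(type_seq[start:])
--         for plen in range(1, m // 2 + 1):
--             reps = z[plen] // plen + 1
--             if reps >= 2:
--                 cands.append((reps * plen, plen, reps, start))
--     if not cands:
--         return None
--     cov, plen, reps, start = max(cands, key=lambda c: c[0])
--     return type_seq[start:start + plen], reps, start, start + cov
-- ===== Notes on version B (the rewrite author's own statement) =====
-- stated objective: faster
-- what changed: Replaces A's per-pattern-length block-by-block rescanning with one Z-array per start offset (repeats = z[plen] // plen + 1 in O(1) per length) and a deferred first-max over candidate tuples that slices the winning pattern only once.
import Mathlib
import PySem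

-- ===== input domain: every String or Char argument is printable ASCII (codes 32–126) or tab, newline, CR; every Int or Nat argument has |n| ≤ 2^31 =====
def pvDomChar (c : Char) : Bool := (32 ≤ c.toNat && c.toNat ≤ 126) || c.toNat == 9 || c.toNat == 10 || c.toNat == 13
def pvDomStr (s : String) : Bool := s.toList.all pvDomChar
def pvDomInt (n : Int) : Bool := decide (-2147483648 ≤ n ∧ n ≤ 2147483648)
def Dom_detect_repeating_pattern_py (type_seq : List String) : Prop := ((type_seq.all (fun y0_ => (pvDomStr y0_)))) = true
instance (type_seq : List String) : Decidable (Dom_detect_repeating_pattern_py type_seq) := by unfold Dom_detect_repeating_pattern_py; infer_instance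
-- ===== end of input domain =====

-- B replaces A's per-pattern-length block rescans by one Z-array per start offset
-- (repeats = z[plen] / plen + 1) and a deferred max over candidate tuples (measured faster).

-- ===== PORT A =====
-- inner loop `for i in range(0, sub_n, plen): if sub[i:i+plen] == pattern: repeats += 1 else: break`
-- (the `plen = 0` test is only a termination guard; A only calls this with plen ≥ 1)
def repA (sub pattern : List String) (plen i : Nat) : Nat :=
  if plen = 0 then 0
  else if i < sub.length then
    (if PySem.List.slice sub (some (i : Int)) (some ((i : Int) + (plen : Int))) = pattern
     then 1 + repA sub pattern plen (i + plen)
     else 0)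
  else 0
termination_by sub.length - i
decreasing_by omega

def detect_repeating_pattern_py (type_seq : List String) : Option (List String × Int × Int × Int) :=
  let n := type_seq.length
  -- best : (coverage, pattern, repeats, start_idx, end_idx)
  let best := (List.range (min (n / 2) 5)).foldl (fun best start =>
    let sub := type_seq.drop start              -- type_seq[start:]
    let sub_n := sub.length
    (List.range' 1 (sub_n / 2)).foldl (fun best plen =>   -- range(1, sub_n // 2 + 1)
      let pattern := sub.take plen              -- sub[:plen]
      let repeats := repA sub pattern plen 0
      if 2 ≤ repeats then
        let coverage := repeats * plen
        match best with
        | none => some (coverage, pattern, repeats, start, start + coverage)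
        | some b => if b.1 < coverage then some (coverage, pattern, repeats, start, start + coverage) else some b
      else best) best)
    (none : Option (Nat × List String × Nat × Nat × Nat))
  match best with
  | none => none
  | some (_, p, r, s, e) => some (p, (r : Int), (s : Int), (e : Int))

-- ===== PORT B =====
-- `while i + k < m and sub[k] == sub[i + k]: k += 1`
def zwhile (sub : List String) (i k : Nat) : Nat :=
  if i + k < sub.length ∧ sub.getD k "" = sub.getD (i + k) "" then zwhile sub i (k + 1) else k
termination_by sub.length - k
decreasing_by omega

-- `_z_array`: state (z, l, r), loop `for i in range(1, m)`
def zArr (sub : List String) : List Nat :=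
  let m := sub.length
  (((List.range' 1 (m - 1)).foldl (fun (s : List Nat × Nat × Nat) i =>
      let z := s.1
      let l := s.2.1
      let r := s.2.2
      let k0 := if i < r then min (r - i) (z.getD (i - l) 0) else 0
      let k := zwhile sub i k0
      let z' := z.set i k
      if r < i + k then (z', i, i + k) else (z', l, r))
    (List.replicate m 0, 0, 0))).1

def detect_repeating_pattern_py_alt (type_seq : List String) : Option (List String × Int × Int × Int) :=
  let n := type_seq.length
  -- cands : (coverage, plen, repeats, start)
  let cands := (List.range (min (n / 2) 5)).flatMap (fun start =>
    let m := n - start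
    let z := zArr (type_seq.drop start)
    (List.range' 1 (m / 2)).filterMap (fun plen =>      -- range(1, m // 2 + 1)
      let reps := z.getD plen 0 / plen + 1
      if 2 ≤ reps then some (reps * plen, plen, reps, start) else none))
  -- `if not cands: return None` + `max(cands, key=lambda c: c[0])` (first maximum)
  match PySem.List.max? cands (fun c => c.1) with
  | none => none
  | some (cov, plen, reps, start) =>
      some (PySem.List.slice type_seq (some (start : Int)) (some ((start : Int) + (plen : Int))),
            (reps : Int), (start : Int), ((start + cov : Nat) : Int))

-- ===== PRECONDITION & SPEC =====
def Spec_detect_repeating_pattern_py (type_seq : List String) (out : Option (List String × Int × Int × Int)) : Prop := out = detect_repeating_pattern_py_alt type_seq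
instance (type_seq : List String) (out : Option (List String × Int × Int × Int)) : Decidable (Spec_detect_repeating_pattern_py type_seq out) := by unfold Spec_detect_repeating_pattern_py; infer_instance

-- ===== CLAIM (what is proved, stated in full; the proofs are below) =====
def Claim_equal_detect_repeating_pattern_py : Prop := ∀ (type_seq : List String), Dom_detect_repeating_pattern_py type_seq → Spec_detect_repeating_pattern_py type_seq (detect_repeating_pattern_py type_seq)

-- ===== LEMMAS AND PROOFS =====

-- K is a stopping point of the prefix-matching loop of sub against sub[i:]
def ZP (sub : List String) (i K : Nat) : Prop :=
  (∀ t, t < K → i + t < sub.length ∧ sub.getD t "" = sub.getD (i + t) "") ∧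
  ¬(i + K < sub.length ∧ sub.getD K "" = sub.getD (i + K) "")

theorem ZP_unique {sub : List String} {i K1 K2 : Nat} (h1 : ZP sub i K1) (h2 : ZP sub i K2) : K1 = K2 := by
  by_contra hne
  rcases Nat.lt_or_ge K1 K2 with h | h
  · exact h1.2 (h2.1 K1 h)
  · rcases Nat.lt_or_ge K2 K1 with h' | h'
    · exact h2.2 (h1.1 K2 h')
    · omega

theorem zwhile_ZP (sub : List String) (i : Nat) :
    ∀ k, (∀ t, t < k → i + t < sub.length ∧ sub.getD t "" = sub.getD (i + t) "") →
    ZP sub i (zwhile sub i k) ∧ k ≤ zwhile sub i k := by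
  intro k
  induction k using zwhile.induct sub i with
  | case1 k hcond ih =>
      intro hk
      rw [zwhile, if_pos hcond]
      have h2 := ih (by
        intro t ht
        rcases Nat.lt_or_ge t k with h | h
        · exact hk t h
        · have : t = k := by omega
          subst this; exact hcond)
      exact ⟨h2.1, by omega⟩
  | case2 k hcond =>
      intro hk
      rw [zwhile, if_neg hcond]
      exact ⟨⟨hk, hcond⟩, Nat.le_refl k⟩

-- the longest common prefix of sub and sub[i:], as B's while loop computes it
def lcpZ (sub : List String) (i : Nat) : Nat := zwhile sub i 0

theorem lcpZ_ZP (sub : List String) (i : Nat) : ZP sub i (lcpZ sub i) :=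
  (zwhile_ZP sub i 0 (by intro t ht; omega)).1

-- period-p matching propagates along multiples of p
theorem lcp_chain (sub : List String) (p : Nat) (m : Nat) (hm : ZP sub p m) :
    ∀ j u, u + j * p < m + p → sub.getD (u + j * p) "" = sub.getD u "" := by
  intro j
  induction j with
  | zero => intro u _; simp
  | succ j ih =>
      intro u h
      have hlt : u + j * p < m := by
        have h2 : (j + 1) * p = j * p + p := Nat.succ_mul j p
        omega
      have h1 := (hm.1 (u + j * p) hlt).2
      have : u + (j + 1) * p = p + (u + j * p) := by ring
      rw [this, ← h1, ih u (by omega)]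

theorem take_drop_eq_take_iff (sub : List String) (i p : Nat) (hp : 0 < p) (hpn : p ≤ sub.length) :
    ((sub.drop i).take p = sub.take p) ↔
      (i + p ≤ sub.length ∧ ∀ u, u < p → sub.getD (i + u) "" = sub.getD u "") := by
  constructor
  · intro h
    have hlen : ((sub.drop i).take p).length = (sub.take p).length := by rw [h]
    simp [List.length_take, List.length_drop] at hlen
    have hip : i + p ≤ sub.length := by omega
    refine ⟨hip, ?_⟩
    intro u hu
    have h1 : ((sub.drop i).take p).getD u "" = sub.getD (i + u) "" := by
      rw [List.getD_eq_getElem?_getD, List.getElem?_take, if_pos hu,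
        List.getElem?_drop, ← List.getD_eq_getElem?_getD]
    have h2 : ((sub.take p).getD u "") = sub.getD u "" := by
      rw [List.getD_eq_getElem?_getD, List.getElem?_take, if_pos hu,
        ← List.getD_eq_getElem?_getD]
    rw [← h1, h, h2]
  · rintro ⟨hip, hu⟩
    apply List.ext_getElem?
    intro u
    rcases Nat.lt_or_ge u p with h | h
    · rw [List.getElem?_take, if_pos h, List.getElem?_take, if_pos h, List.getElem?_drop]
      have hu1 : i + u < sub.length := by omega
      have hu2 : u < sub.length := by omega
      rw [List.getElem?_eq_getElem hu1, List.getElem?_eq_getElem hu2]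
      have := hu u h
      rw [List.getD_eq_getElem?_getD, List.getD_eq_getElem?_getD,
        List.getElem?_eq_getElem hu1, List.getElem?_eq_getElem hu2] at this
      simpa using this
    · rw [List.getElem?_take, if_neg (by omega), List.getElem?_take, if_neg (by omega)]

theorem ZP_add_le (sub : List String) (p m : Nat) (hp : 1 ≤ p) (hpn : 2 * p ≤ sub.length)
    (hm : ZP sub p m) : m + p ≤ sub.length := by
  rcases Nat.eq_zero_or_pos m with h0 | hpos
  · omega
  · have := (hm.1 (m - 1) (by omega)).1
    omega

theorem block_eq (sub : List String) (p m j i : Nat) (hp : 1 ≤ p) (hpn : 2 * p ≤ sub.length)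
    (hm : ZP sub p m) (hij : i = j * p) (him : i ≤ m) :
    PySem.List.slice sub (some (i : Int)) (some ((i : Int) + (p : Int))) = sub.take p := by
  have hmn := ZP_add_le sub p m hp hpn hm
  rw [PySem.List.slice_natCast_add]
  rw [take_drop_eq_take_iff sub i p (by omega) (by omega)]
  refine ⟨by omega, ?_⟩
  intro u hu
  have h := lcp_chain sub p m hm j u (by omega)
  rw [show i + u = u + j * p by omega, h]

theorem repA_base (sub : List String) (p m j i : Nat) (hp : 1 ≤ p) (hpn : 2 * p ≤ sub.length)
    (hm : ZP sub p m) (hij : i = j * p) (him : i ≤ m) (hbase : m < i + p) :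
    repA sub (sub.take p) p i = 1 := by
  have hmn := ZP_add_le sub p m hp hpn hm
  rw [repA, if_neg (by omega), if_pos (by omega : i < sub.length),
    if_pos (block_eq sub p m j i hp hpn hm hij him)]
  have hz : repA sub (sub.take p) p (i + p) = 0 := by
    rw [repA, if_neg (by omega)]
    by_cases hin : i + p < sub.length
    · rw [if_pos hin]
      have hne : ¬ (PySem.List.slice sub (some ((i + p : Nat) : Int))
          (some (((i + p : Nat) : Int) + (p : Int))) = sub.take p) := by
        intro heq
        rw [PySem.List.slice_natCast_add,
          take_drop_eq_take_iff sub (i + p) p (by omega) (by omega)] at heq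
        rcases Decidable.not_and_iff_not_or_not.mp hm.2 with hc | hc
        · omega
        · apply hc
          have h1 := heq.2 (m - i) (by omega)
          have h2 := lcp_chain sub p m hm j (m - i) (by omega)
          rw [show i + p + (m - i) = p + m by omega] at h1
          rw [show m - i + j * p = m by omega] at h2
          rw [h2, ← h1]
      rw [if_neg (by push_cast; push_cast at hne; exact hne)]
    · rw [if_neg hin]
  rw [hz]

theorem repA_eqd (sub : List String) (p m : Nat) (hp : 1 ≤ p) (hpn : 2 * p ≤ sub.length)
    (hm : ZP sub p m) :
    ∀ d j i, i = j * p → i ≤ m → m - i ≤ d → repA sub (sub.take p) p i = (m - i) / p + 1 := by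
  intro d
  induction d with
  | zero =>
      intro j i hij him hd
      have h1 := repA_base sub p m j i hp hpn hm hij him (by omega)
      rw [h1, Nat.div_eq_of_lt (by omega)]
  | succ d ih =>
      intro j i hij him hd
      rcases Nat.lt_or_ge m (i + p) with hbase | hrec
      · have h1 := repA_base sub p m j i hp hpn hm hij him hbase
        rw [h1, Nat.div_eq_of_lt (by omega)]
      · have hmn := ZP_add_le sub p m hp hpn hm
        rw [repA, if_neg (by omega), if_pos (by omega : i < sub.length),
          if_pos (block_eq sub p m j i hp hpn hm hij him)]
        rw [ih (j + 1) (i + p) (by rw [hij]; ring) hrec (by omega)]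
        rw [show m - i = (m - (i + p)) + p by omega, Nat.add_div_right _ (by omega : 0 < p)]
        omega

-- MAIN INNER LEMMA: A's block-counting loop equals lcp / p + 1
theorem repA_eq (sub : List String) (p : Nat) (hp : 1 ≤ p) (hpn : 2 * p ≤ sub.length) :
    repA sub (sub.take p) p 0 = lcpZ sub p / p + 1 := by
  have h := repA_eqd sub p (lcpZ sub p) hp hpn (lcpZ_ZP sub p) (lcpZ sub p) 0 0 (by simp)
    (by omega) (by omega)
  simpa using h

-- ---- the Z-array loop computes lcpZ ----

-- proof-side name for the loop body of zArr
def zstep (sub : List String) (s : List Nat × Nat × Nat) (i : Nat) : List Nat × Nat × Nat :=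
  let z := s.1
  let l := s.2.1
  let r := s.2.2
  let k0 := if i < r then min (r - i) (z.getD (i - l) 0) else 0
  let k := zwhile sub i k0
  let z' := z.set i k
  if r < i + k then (z', i, i + k) else (z', l, r)

theorem zArr_eq_fold (sub : List String) :
    zArr sub = ((List.range' 1 (sub.length - 1)).foldl (zstep sub)
      (List.replicate sub.length 0, 0, 0)).1 := rfl

def ZInv (sub : List String) (i : Nat) (s : List Nat × Nat × Nat) : Prop :=
  s.1.length = sub.length ∧
  (∀ j, j < i → s.1.getD j 0 = (if j = 0 then 0 else lcpZ sub j)) ∧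
  s.2.1 < i ∧
  (s.2.1 = 0 → s.2.2 = 0) ∧
  s.2.2 ≤ sub.length ∧
  s.2.1 ≤ s.2.2 ∧
  (∀ t, t < s.2.2 - s.2.1 → sub.getD t "" = sub.getD (s.2.1 + t) "")

theorem zstep_inv (sub : List String) (i : Nat) (s : List Nat × Nat × Nat)
    (hi : 1 ≤ i) (hin : i < sub.length) (h : ZInv sub i s) : ZInv sub (i + 1) (zstep sub s i) := by
  obtain ⟨hlen, hz, hl, hl0, hr, hlr, hbox⟩ := h
  obtain ⟨z, l, r⟩ := s
  simp only at hlen hz hl hl0 hr hlr hbox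
  have hk0 : ∀ t, t < (if i < r then min (r - i) (z.getD (i - l) 0) else 0) →
      i + t < sub.length ∧ sub.getD t "" = sub.getD (i + t) "" := by
    intro t ht
    by_cases hir : i < r
    · rw [if_pos hir] at ht
      have hlpos : 1 ≤ l := by
        by_contra hc
        have : l = 0 := by omega
        have := hl0 this
        omega
      have hilz : z.getD (i - l) 0 = lcpZ sub (i - l) := by
        have := hz (i - l) (by omega)
        rwa [if_neg (by omega)] at this
      rw [hilz] at ht
      have ht1 : t < r - i := by omega
      have ht2 : t < lcpZ sub (i - l) := by omega
      refine ⟨by omega, ?_⟩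
      have h1 := (lcpZ_ZP sub (i - l)).1 t ht2
      have h2 := hbox ((i - l) + t) (by omega)
      rw [show l + (i - l + t) = i + t by omega] at h2
      rw [h1.2, h2]
    · rw [if_neg hir] at ht; omega
  have hkZP := zwhile_ZP sub i _ hk0
  set k := zwhile sub i (if i < r then min (r - i) (z.getD (i - l) 0) else 0) with hkdef
  have hkl : k = lcpZ sub i := ZP_unique hkZP.1 (lcpZ_ZP sub i)
  have hik : i + k ≤ sub.length := by
    rcases Nat.eq_zero_or_pos k with h0 | hpos
    · omega
    · have := (hkZP.1.1 (k - 1) (by omega)).1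
      omega
  have hzset : ∀ j, j < i + 1 → (z.set i k).getD j 0 = (if j = 0 then 0 else lcpZ sub j) := by
    intro j hj
    rw [List.getD_eq_getElem?_getD, List.getElem?_set]
    rcases Nat.lt_or_ge j i with hji | hji
    · rw [if_neg (by omega), ← List.getD_eq_getElem?_getD]
      exact hz j hji
    · have : j = i := by omega
      subst this
      rw [if_pos rfl, if_pos (by omega), if_neg (by omega)]
      simp [hkl]
  unfold zstep ZInv
  simp only
  by_cases hbr : r < i + k
  · rw [if_pos hbr]
    dsimp only
    refine ⟨by simp [hlen], hzset, by omega, by omega, by simpa using hik, by omega, ?_⟩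
    intro t ht
    exact (hkZP.1.1 t (by omega)).2
  · rw [if_neg hbr]
    dsimp only
    exact ⟨by simp [hlen], hzset, by omega, hl0, hr, hlr, hbox⟩

theorem fold_inv (sub : List String) :
    ∀ (len a : Nat) (s : List Nat × Nat × Nat), 1 ≤ a → a + len ≤ sub.length → ZInv sub a s →
      ZInv sub (a + len) ((List.range' a len).foldl (zstep sub) s) := by
  intro len
  induction len with
  | zero => intro a s _ _ h; simpa using h
  | succ len ih =>
      intro a s ha halen h
      rw [List.range'_succ, List.foldl_cons]
      have := ih (a + 1) (zstep sub s a) (by omega) (by omega)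
        (zstep_inv sub a s ha (by omega) h)
      rwa [show a + (len + 1) = a + 1 + len by omega]

theorem zArr_spec (sub : List String) (j : Nat) (h1 : 1 ≤ j) (h2 : j < sub.length) :
    (zArr sub).getD j 0 = lcpZ sub j := by
  have hinit : ZInv sub 1 (List.replicate sub.length 0, 0, 0) := by
    refine ⟨by simp, ?_, by simp, fun _ => rfl, by simp, by simp, by intro t ht; simp at ht⟩
    intro j hj
    have : j = 0 := by omega
    subst this
    simp [List.getD_eq_getElem?_getD, List.getElem?_replicate, if_pos (by omega : 0 < sub.length)]
  have hfin := fold_inv sub (sub.length - 1) 1 _ (by omega) (by omega) hinit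
  rw [show 1 + (sub.length - 1) = sub.length by omega] at hfin
  rw [zArr_eq_fold]
  have := hfin.2.1 j h2
  rwa [if_neg (by omega)] at this

-- ---- outer structure: interleaved best-update fold vs candidate list + first-max ----

def updA : Option (Nat × List String × Nat × Nat × Nat) → (Nat × List String × Nat × Nat × Nat) → Option (Nat × List String × Nat × Nat × Nat) :=
  fun best c => match best with
    | none => some c
    | some b => if b.1 < c.1 then some c else some b

theorem foldl_optmatch {γ C : Type} (f : γ → Option C) (g : Option C → C → Option C) :
    ∀ (l : List γ) (b : Option C),
      l.foldl (fun b x => match f x with | some c => g b c | none => b) b = (l.filterMap f).foldl g b := by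
  intro l
  induction l with
  | nil => intro b; simp
  | cons hd tl ih =>
      intro b
      rw [List.foldl_cons, List.filterMap_cons]
      cases h : f hd with
      | none => exact ih b
      | some c => rw [List.foldl_cons]; exact ih (g b c)

theorem foldl_inner_fold {α β C : Type} (g : α → List β) (f : Option C → β → Option C) :
    ∀ (l : List α) (b : Option C),
      l.foldl (fun b x => (g x).foldl f b) b = (l.flatMap g).foldl f b := by
  intro l
  induction l with
  | nil => intro b; simp
  | cons hd tl ih => intro b; rw [List.foldl_cons, List.flatMap_cons, List.foldl_append]; exact ih _

theorem foldl_updA_map_phi (Φ : (Nat × Nat × Nat × Nat) → (Nat × List String × Nat × Nat × Nat))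
    (hΦ : ∀ c, (Φ c).1 = c.1) :
    ∀ (l : List (Nat × Nat × Nat × Nat)) (b : Option (Nat × Nat × Nat × Nat)),
      (l.map Φ).foldl updA (Option.map Φ b) =
        Option.map Φ (l.foldl (fun acc x => match acc with
          | none => some x
          | some m => if m.1 < x.1 then some x else some m) b) := by
  intro l
  induction l with
  | nil => intro b; simp
  | cons hd tl ih =>
      intro b
      rw [List.map_cons, List.foldl_cons, List.foldl_cons]
      have : updA (Option.map Φ b) (Φ hd) =
          Option.map Φ (match b with
            | none => some hd
            | some m => if m.1 < hd.1 then some hd else some m) := by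
        cases b with
        | none => rfl
        | some m =>
            simp only [Option.map_some, updA, hΦ]
            by_cases h : m.1 < hd.1
            · rw [if_pos h, if_pos h]; rfl
            · rw [if_neg h, if_neg h]; rfl
      rw [this, ih]

-- A's candidate at (start, plen), and A's and B's candidate lists
def candA (type_seq : List String) : List (Nat × List String × Nat × Nat × Nat) :=
  (List.range (min (type_seq.length / 2) 5)).flatMap (fun start =>
    let sub := type_seq.drop start
    (List.range' 1 (sub.length / 2)).filterMap (fun plen =>
      let pattern := sub.take plen
      let repeats := repA sub pattern plen 0
      if 2 ≤ repeats then some (repeats * plen, pattern, repeats, start, start + repeats * plen) else none))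

def candB (type_seq : List String) : List (Nat × Nat × Nat × Nat) :=
  (List.range (min (type_seq.length / 2) 5)).flatMap (fun start =>
    let m := type_seq.length - start
    let z := zArr (type_seq.drop start)
    (List.range' 1 (m / 2)).filterMap (fun plen =>
      let reps := z.getD plen 0 / plen + 1
      if 2 ≤ reps then some (reps * plen, plen, reps, start) else none))

def ΦA (type_seq : List String) (c : Nat × Nat × Nat × Nat) : Nat × List String × Nat × Nat × Nat :=
  (c.1, (type_seq.drop c.2.2.2).take c.2.1, c.2.2.1, c.2.2.2, c.2.2.2 + c.1)

theorem candA_eq (type_seq : List String) : candA type_seq = (candB type_seq).map (ΦA type_seq) := by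
  rw [candA, candB, List.map_flatMap]
  congr 1
  funext start
  dsimp only
  rw [List.map_filterMap]
  rw [List.length_drop]
  apply List.filterMap_congr
  intro plen hmem
  rw [List.mem_range'_1] at hmem
  dsimp only
  have hm2 : 2 * plen ≤ type_seq.length - start := by omega
  have hlen : (type_seq.drop start).length = type_seq.length - start := List.length_drop
  have hz : (zArr (type_seq.drop start)).getD plen 0 = lcpZ (type_seq.drop start) plen := by
    apply zArr_spec _ plen (by omega)
    omega
  have hrep : repA (type_seq.drop start) ((type_seq.drop start).take plen) plen 0 =
      lcpZ (type_seq.drop start) plen / plen + 1 := by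
    apply repA_eq _ plen (by omega)
    omega
  rw [hrep, hz]
  by_cases h2 : 2 ≤ lcpZ (type_seq.drop start) plen / plen + 1
  · rw [if_pos h2, if_pos h2]
    rfl
  · rw [if_neg h2, if_neg h2]
    rfl

-- A's interleaved double fold produces exactly foldl updA none (candA ts)
theorem A_fold (ts : List String) :
    ((List.range (min (ts.length / 2) 5)).foldl (fun best start =>
      let sub := ts.drop start
      let sub_n := sub.length
      (List.range' 1 (sub_n / 2)).foldl (fun best plen =>
        let pattern := sub.take plen
        let repeats := repA sub pattern plen 0
        if 2 ≤ repeats then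
          let coverage := repeats * plen
          match best with
          | none => some (coverage, pattern, repeats, start, start + coverage)
          | some b => if b.1 < coverage then some (coverage, pattern, repeats, start, start + coverage) else some b
        else best) best)
      (none : Option (Nat × List String × Nat × Nat × Nat)))
    = (candA ts).foldl updA none := by
  rw [candA, ← foldl_inner_fold]
  congr 1
  funext best start
  dsimp only
  rw [← foldl_optmatch]
  congr 1
  funext b plen
  dsimp only
  by_cases h : 2 ≤ repA (ts.drop start) ((ts.drop start).take plen) plen 0
  · rw [if_pos h, if_pos h]
    cases b with
    | none => rfl
    | some bb => rfl
  · rw [if_neg h, if_neg h]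

-- foldl updA over the mapped list is max? of the unmapped one
theorem fold_eq_max (ts : List String) (l : List (Nat × Nat × Nat × Nat)) :
    (l.map (ΦA ts)).foldl updA none = Option.map (ΦA ts) (PySem.List.max? l (fun c => c.1)) := by
  have h := foldl_updA_map_phi (ΦA ts) (fun c => rfl) l none
  simp only [Option.map_none] at h
  have hfun : PySem.List.max? l (fun c => c.1) =
      List.foldl (fun acc x => match acc with
        | none => some x
        | some m => if m.1 < x.1 then some x else some m) none l := by
    unfold PySem.List.max?
    beta_reduce
    congr 1
    funext acc x
    cases acc with
    | none => rfl
    | some m => exact rfl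
  rw [hfun]
  exact h

-- the final `return` of each port, as functions of the selected best candidate
def finA (o : Option (Nat × List String × Nat × Nat × Nat)) : Option (List String × Int × Int × Int) :=
  match o with
  | none => none
  | some (_, p, r, s, e) => some (p, (r : Int), (s : Int), (e : Int))

def finB (ts : List String) (o : Option (Nat × Nat × Nat × Nat)) : Option (List String × Int × Int × Int) :=
  match o with
  | none => none
  | some (cov, plen, reps, start) =>
      some (PySem.List.slice ts (some (start : Int)) (some ((start : Int) + (plen : Int))),
            (reps : Int), (start : Int), ((start + cov : Nat) : Int))

-- ===== VERDICT (by name: the statement is the Claim_ definition above) =====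
theorem detect_repeating_pattern_py_spec : Claim_equal_detect_repeating_pattern_py := by
  intro ts _
  unfold Spec_detect_repeating_pattern_py
  have hA : detect_repeating_pattern_py ts = finA
      ((List.range (min (ts.length / 2) 5)).foldl (fun best start =>
        let sub := ts.drop start
        let sub_n := sub.length
        (List.range' 1 (sub_n / 2)).foldl (fun best plen =>
          let pattern := sub.take plen
          let repeats := repA sub pattern plen 0
          if 2 ≤ repeats then
            let coverage := repeats * plen
            match best with
            | none => some (coverage, pattern, repeats, start, start + coverage)
            | some b => if b.1 < coverage then some (coverage, pattern, repeats, start, start + coverage) else some b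
          else best) best)
        (none : Option (Nat × List String × Nat × Nat × Nat))) := rfl
  have hB : detect_repeating_pattern_py_alt ts =
      finB ts (PySem.List.max? (candB ts) (fun c => c.1)) := rfl
  rw [hA, hB, A_fold ts, candA_eq ts, fold_eq_max ts]
  cases PySem.List.max? (candB ts) (fun c => c.1) with
  | none => rfl
  | some c =>
      obtain ⟨cov, plen, reps, start⟩ := c
      show finA (some (ΦA ts (cov, plen, reps, start))) = _
      unfold finA finB ΦA
      dsimp only
      rw [PySem.List.slice_natCast_add]
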